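-- pv_equiv track=rewrite | github.com/code-study-classes/python-basics-ArtyMaly | practice_package/strings.py | count_groups_of_vowels
-- ===== SOURCE A (Python) =====
-- def count_groups_of_vowels(word):
--     vowels = 'aeiouy'
--     word = word.lower()
--     count = 0
--     in_group = False
--
--     for letter in word:
--         if letter in vowels:
--             if not in_group:
--                 count += 1
--                 in_group = True
--         else:
--             in_group = False
--
--     return count
-- ===== SOURCE B (Python) =====
-- def count_groups_of_vowels(word):
--     vowels = 'aeiouy'
--     masked = ''.join(c if c in vowels else ' ' for c in word.lower())
--     return len(masked.split())
-- ===== Notes on version B (the rewrite author's own statement) =====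
-- stated objective: alternative
-- what changed: Two staged passes instead of a stateful flag loop: first map every non-vowel to a space, then count the tokens produced by whitespace split() - each token is exactly one maximal vowel run.
import Mathlib
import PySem

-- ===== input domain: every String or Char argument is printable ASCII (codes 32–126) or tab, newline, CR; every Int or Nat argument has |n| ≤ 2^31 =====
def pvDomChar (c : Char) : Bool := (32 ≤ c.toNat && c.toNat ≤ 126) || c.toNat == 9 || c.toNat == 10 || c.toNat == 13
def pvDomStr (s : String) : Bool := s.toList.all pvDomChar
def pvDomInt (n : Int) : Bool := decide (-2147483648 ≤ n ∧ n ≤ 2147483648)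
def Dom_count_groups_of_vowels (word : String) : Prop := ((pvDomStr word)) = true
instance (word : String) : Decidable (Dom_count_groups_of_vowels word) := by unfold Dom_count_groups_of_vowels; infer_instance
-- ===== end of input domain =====

-- B replaces A's stateful in_group flag loop by two staged passes: mask non-vowels to spaces, then count split() tokens; objective: alternative.

-- ===== PORT A =====
-- vowel test: Python's `letter in 'aeiouy'` for a single character = char membership
def pvIsVowel (c : Char) : Bool := ['a','e','i','o','u','y'].contains c

-- Port of A: fold carrying (count, in_group), branch order as in the Python
def count_groups_of_vowels (word : String) : Int :=
  (((PySem.Str.lower word).toList).foldl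
    (fun (st : Int × Bool) letter =>
      if pvIsVowel letter then
        if !st.2 then (st.1 + 1, true) else st
      else (st.1, false))
    (0, false)).1

-- ===== PORT B =====
-- Port of B: mask non-vowels of the lowered word to spaces, then len(masked.split())
def count_groups_of_vowels_alt (word : String) : Int :=
  let masked := ((PySem.Str.lower word).toList).map (fun c => if pvIsVowel c then c else ' ')
  ((PySem.Chars.split₀ masked).length : Int)

-- ===== PRECONDITION & SPEC =====
def Spec_count_groups_of_vowels (word : String) (out : Int) : Prop := out = count_groups_of_vowels_alt word
instance (word : String) (out : Int) : Decidable (Spec_count_groups_of_vowels word out) := by unfold Spec_count_groups_of_vowels; infer_instance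

-- ===== CLAIM (what is proved, stated in full; the proofs are below) =====
def Claim_equal_count_groups_of_vowels : Prop := ∀ (word : String), Dom_count_groups_of_vowels word → Spec_count_groups_of_vowels word (count_groups_of_vowels word)

-- ===== LEMMAS AND PROOFS =====

-- run-starts counted by recursion, b = "previous char was a vowel"
def cntStarts (b : Bool) : List Char → Nat
  | [] => 0
  | x :: xs => (if pvIsVowel x && !b then 1 else 0) + cntStarts (pvIsVowel x) xs

-- words counted at their END, b = "currently inside a word"
def wcount (b : Bool) : List Char → Nat
  | [] => if b then 1 else 0
  | c :: xs => if PySem.Chars.isspace c then (if b then 1 else 0) + wcount false xs else wcount true xs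

theorem foldl_eq_cnt (l : List Char) (c : Int) (b : Bool) :
    (l.foldl
      (fun (st : Int × Bool) letter =>
        if pvIsVowel letter then
          if !st.2 then (st.1 + 1, true) else st
        else (st.1, false))
      (c, b)).1 = c + (cntStarts b l : Nat) := by
  induction l generalizing c b with
  | nil => simp [cntStarts]
  | cons x xs ih =>
    cases hv : pvIsVowel x <;> cases b <;>
      simp only [List.foldl_cons, cntStarts, hv, Bool.not_true, Bool.not_false,
        Bool.and_true, Bool.and_false, if_true, if_false, Bool.false_eq_true] <;>
      rw [ih] <;> push_cast <;> ring

theorem isspace_of_vowel (c : Char) (h : pvIsVowel c = true) :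
    PySem.Chars.isspace c = false := by
  unfold pvIsVowel at h
  simp at h
  rcases h with rfl | rfl | rfl | rfl | rfl | rfl <;> rfl

theorem go_length (l cur : List Char) (acc : List (List Char)) :
    (PySem.Chars.split₀.go l cur acc).length = acc.length + wcount (!cur.isEmpty) l := by
  induction l generalizing cur acc with
  | nil =>
    cases cur <;> simp [PySem.Chars.split₀.go, wcount]
  | cons c xs ih =>
    by_cases hs : PySem.Chars.isspace c = true
    · cases cur with
      | nil => simp [PySem.Chars.split₀.go, hs, wcount, ih]
      | cons y ys =>
        simp [PySem.Chars.split₀.go, hs, wcount, ih]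
        omega
    · simp only [Bool.not_eq_true] at hs
      cases cur <;> simp [PySem.Chars.split₀.go, hs, wcount, ih]

theorem wcount_mask (l : List Char) (b : Bool) :
    wcount b (l.map (fun c => if pvIsVowel c then c else ' '))
      = cntStarts b l + (if b then 1 else 0) := by
  induction l generalizing b with
  | nil => simp [wcount, cntStarts]
  | cons x xs ih =>
    cases hv : pvIsVowel x with
    | true =>
      cases b <;>
        simp [wcount, cntStarts, hv, ih, isspace_of_vowel _ hv] <;> omega
    | false =>
      cases b <;>
        simp [wcount, cntStarts, hv, ih,
          show PySem.Chars.isspace ' ' = true from rfl] <;> omega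

-- ===== VERDICT (by name: the statement is the Claim_ definition above) =====
theorem count_groups_of_vowels_spec : Claim_equal_count_groups_of_vowels := by
  intro word _
  show count_groups_of_vowels word = count_groups_of_vowels_alt word
  unfold count_groups_of_vowels count_groups_of_vowels_alt
  simp only [foldl_eq_cnt, PySem.Chars.split₀, go_length, wcount_mask, zero_add]
  simp
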